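-- pv_equiv track=rewrite | github.com/slnt00001/parser_Cord | Cord/alltSmoothOut.py | limit_slope
-- ===== SOURCE A (Python) =====
-- def limit_slope(altitudes, max_diff=2):
--     limited = [altitudes[0]]
--     for i in range(1, len(altitudes)):
--         diff = altitudes[i] - limited[-1]
--         if abs(diff) > max_diff:
--             diff = max_diff if diff > 0 else -max_diff
--         limited.append(limited[-1] + diff)
--     return limited
-- ===== SOURCE B (Python) =====
-- def limit_slope(altitudes, max_diff=2):
--     # Stage 1: fold over consecutive raw differences, building the list of
--     # smoothing residuals e_i = altitudes[i] - output[i] (residual 0 at index 0).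
--     residuals = [0]
--     for prev, cur in zip(altitudes, altitudes[1:]):
--         d = cur - prev + residuals[-1]
--         step = min(d, max_diff) if d > 0 else max(d, -max_diff)
--         residuals.append(d - step)
--     # Stage 2: subtract the residuals from the raw altitudes.
--     return [x - e for x, e in zip(altitudes, residuals)]
-- ===== Notes on version B (the rewrite author's own statement) =====
-- stated objective: alternative
-- what changed: B never carries the smoothed altitude: it folds over the zipped consecutive raw differences to build a list of smoothing residuals (output deficit per index), then produces the result in a separate pass that subtracts each residual from the raw altitude, instead of A's index loop appending clamped values onto the output.
-- crash fix: On the empty list A raises IndexError (altitudes[0]); B returns []. — e.g. on limit_slope([], 2): A raises IndexError, B returns []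
import Mathlib
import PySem

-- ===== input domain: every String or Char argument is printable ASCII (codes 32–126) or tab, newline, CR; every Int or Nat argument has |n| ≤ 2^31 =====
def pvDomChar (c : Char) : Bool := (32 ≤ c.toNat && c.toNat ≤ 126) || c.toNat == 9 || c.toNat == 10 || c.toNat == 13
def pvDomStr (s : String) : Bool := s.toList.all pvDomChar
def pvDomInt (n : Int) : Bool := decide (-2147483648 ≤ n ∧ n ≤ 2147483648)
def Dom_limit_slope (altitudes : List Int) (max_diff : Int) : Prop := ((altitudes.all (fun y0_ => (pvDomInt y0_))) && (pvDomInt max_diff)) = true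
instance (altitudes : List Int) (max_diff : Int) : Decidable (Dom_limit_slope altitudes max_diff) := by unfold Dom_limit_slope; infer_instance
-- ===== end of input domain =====

-- B builds the list of smoothing residuals (raw altitude minus output) from the zipped
-- consecutive raw differences, then subtracts the residuals from the input in a second pass;
-- A carries the smoothed output and appends one clamped value per index. Same return value.

-- ===== PORT A =====
def limit_slope (altitudes : List Int) (max_diff : Int) : List Int :=
  match altitudes with
  | [] => []          -- Python raises IndexError on altitudes[0]; excluded by Pre_
  | a0 :: _ =>
    (PySem.List.pyRange 1 (altitudes.length : Int) 1).foldl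
      (fun limited i =>
        let ai := (PySem.List.pyGet? altitudes i).getD 0        -- in range for i ∈ range(1, len)
        let last := (PySem.List.pyGet? limited (-1)).getD 0     -- limited is never empty
        let diff := ai - last
        let diff := if |diff| > max_diff then (if diff > 0 then max_diff else -max_diff) else diff
        limited ++ [last + diff]) [a0]

-- ===== PORT B =====
-- zip(altitudes, altitudes[1:]) → altitudes.zip (altitudes.drop 1); residuals[-1] → pyGet? _ (-1)
def limit_slope_alt (altitudes : List Int) (max_diff : Int) : List Int :=
  let residuals :=
    (altitudes.zip (altitudes.drop 1)).foldl
      (fun (res : List Int) (pc : Int × Int) =>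
        let d := pc.2 - pc.1 + (PySem.List.pyGet? res (-1)).getD 0
        let step := if d > 0 then min d max_diff else max d (-max_diff)
        res ++ [d - step]) [0]
  (altitudes.zip residuals).map (fun xe => xe.1 - xe.2)

-- ===== PRECONDITION & SPEC =====
-- Pre_ excludes only the empty list, on which A raises IndexError (altitudes[0]).
def Pre_limit_slope (altitudes : List Int) (max_diff : Int) : Prop := altitudes ≠ []
instance (altitudes : List Int) (max_diff : Int) : Decidable (Pre_limit_slope altitudes max_diff) := by unfold Pre_limit_slope; infer_instance
def pvWitness_limit_slope : List Int × Int := ([3, 10, 9, -5], 2)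
-- On the empty list A raises IndexError (altitudes[0]); B returns [].
def Raises_limit_slope (altitudes : List Int) (max_diff : Int) : Prop := altitudes = []
instance (altitudes : List Int) (max_diff : Int) : Decidable (Raises_limit_slope altitudes max_diff) := by unfold Raises_limit_slope; infer_instance
def pvRaiseWitness_limit_slope : List Int × Int := ([], 2)
def pvRaiseWitnessOut_limit_slope : List Int := []
def Spec_limit_slope (altitudes : List Int) (max_diff : Int) (out : List Int) : Prop := out = limit_slope_alt altitudes max_diff
instance (altitudes : List Int) (max_diff : Int) (out : List Int) : Decidable (Spec_limit_slope altitudes max_diff out) := by unfold Spec_limit_slope; infer_instance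

-- ===== CLAIM (what is proved, stated in full; the proofs are below) =====
def Claim_equal_limit_slope : Prop := ∀ (altitudes : List Int) (max_diff : Int), Dom_limit_slope altitudes max_diff → Pre_limit_slope altitudes max_diff → Spec_limit_slope altitudes max_diff (limit_slope altitudes max_diff)
def Claim_raises_limit_slope : Prop := (∀ (altitudes : List Int) (max_diff : Int), Dom_limit_slope altitudes max_diff → Raises_limit_slope altitudes max_diff → ¬ Pre_limit_slope altitudes max_diff) ∧ (Dom_limit_slope (pvRaiseWitness_limit_slope.1) (pvRaiseWitness_limit_slope.2) ∧ Raises_limit_slope (pvRaiseWitness_limit_slope.1) (pvRaiseWitness_limit_slope.2) ∧ limit_slope_alt (pvRaiseWitness_limit_slope.1) (pvRaiseWitness_limit_slope.2) = pvRaiseWitnessOut_limit_slope)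

-- ===== LEMMAS AND PROOFS =====

-- reference scan: the list of successive smoothed values after prev
def pvScan (m prev : Int) : List Int → List Int
  | [] => []
  | x :: xs =>
    let d := x - prev
    let p := prev + (if d > 0 then min d m else max d (-m))
    p :: pvScan m p xs

-- reference residual scan: e_i = raw_i - output_i, driven by raw consecutive differences
def pvResList (m : Int) : Int → Int → List Int → List Int
  | _, _, [] => []
  | prev, e, cur :: xs =>
    let d := cur - prev + e
    let e' := d - (if d > 0 then min d m else max d (-m))
    e' :: pvResList m cur e' xs

-- A's clamped step equals the min/max clamped step (pure integer arithmetic)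
theorem pvStep_eq (d m : Int) :
    (if |d| > m then (if d > 0 then m else -m) else d)
      = (if d > 0 then min d m else max d (-m)) := by
  rcases abs_cases d with ⟨h1, h2⟩ <;> split_ifs <;> omega

-- B's fold over the zipped pairs computes acc ++ pvResList
theorem pvB_fold (m : Int) (rest : List Int) : ∀ (prev e : Int) (acc : List Int),
    acc ≠ [] → acc.getLast? = some e →
    (((prev :: rest).zip rest).foldl
      (fun (res : List Int) (pc : Int × Int) =>
        let d := pc.2 - pc.1 + (PySem.List.pyGet? res (-1)).getD 0
        let step := if d > 0 then min d m else max d (-m)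
        res ++ [d - step]) acc) = acc ++ pvResList m prev e rest := by
  induction rest with
  | nil => intro prev e acc _ _; simp [pvResList]
  | cons cur xs ih =>
    intro prev e acc hne hlast
    have hzip : ((prev :: cur :: xs).zip (cur :: xs)) = (prev, cur) :: ((cur :: xs).zip xs) := rfl
    have h1 : (let d := (prev, cur).2 - (prev, cur).1 + (PySem.List.pyGet? acc (-1)).getD 0
        let step := if d > 0 then min d m else max d (-m)
        acc ++ [d - step])
        = acc ++ [cur - prev + e - (if cur - prev + e > 0 then min (cur - prev + e) m else max (cur - prev + e) (-m))] := by
      simp only [PySem.List.pyGet?_neg_one, hlast, Option.getD_some]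
    rw [hzip, List.foldl_cons, h1,
      ih cur (cur - prev + e - (if cur - prev + e > 0 then min (cur - prev + e) m else max (cur - prev + e) (-m)))
        (acc ++ [cur - prev + e - (if cur - prev + e > 0 then min (cur - prev + e) m else max (cur - prev + e) (-m))])
        (by simp) (by simp)]
    simp [pvResList]

-- subtracting the residuals from the raw values recovers the smoothed scan
theorem pvRes_sub (m : Int) (rest : List Int) : ∀ (prev e : Int),
    List.zipWith (fun x e => x - e) rest (pvResList m prev e rest) = pvScan m (prev - e) rest := by
  induction rest with
  | nil => intro prev e; simp [pvResList, pvScan]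
  | cons cur xs ih =>
    intro prev e
    simp only [pvResList, pvScan, List.zipWith_cons_cons]
    rw [ih]
    have hd : cur - (prev - e) = cur - prev + e := by ring
    rw [hd]
    have h1 : cur - (cur - prev + e - (if cur - prev + e > 0 then min (cur - prev + e) m else max (cur - prev + e) (-m)))
        = prev - e + (if cur - prev + e > 0 then min (cur - prev + e) m else max (cur - prev + e) (-m)) := by ring
    rw [h1]

-- map over zip = zipWith subtraction
theorem pvMapZip (xs ys : List Int) :
    (xs.zip ys).map (fun xe => xe.1 - xe.2) = List.zipWith (fun x e => x - e) xs ys := by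
  induction xs generalizing ys with
  | nil => simp
  | cons x xs ih => cases ys <;> simp [ih]

-- A's fold over range(k, len) computes acc ++ pvScan over the dropped tail
theorem pvA_fold (alts : List Int) (m : Int) : ∀ (j : Nat) (k : Nat) (prev : Int) (acc : List Int),
    alts.length - k = j → acc ≠ [] → acc.getLast? = some prev →
    (PySem.List.pyRange (k : Int) (alts.length : Int) 1).foldl
      (fun limited i =>
        limited ++
          [(PySem.List.pyGet? limited (-1)).getD 0 +
              if |(PySem.List.pyGet? alts i).getD 0 - (PySem.List.pyGet? limited (-1)).getD 0| > m then
                if (PySem.List.pyGet? alts i).getD 0 - (PySem.List.pyGet? limited (-1)).getD 0 > 0 then m else -m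
              else (PySem.List.pyGet? alts i).getD 0 - (PySem.List.pyGet? limited (-1)).getD 0]) acc
      = acc ++ pvScan m prev (alts.drop k) := by
  intro j
  induction j with
  | zero =>
    intro k prev acc hj _ _
    have hk : alts.length ≤ k := by omega
    rw [PySem.List.pyRange_one_eq_nil (by exact_mod_cast hk)]
    simp [List.drop_eq_nil_of_le hk, pvScan]
  | succ n ih =>
    intro k prev acc hj hne hlast
    have hk : k < alts.length := by omega
    rw [PySem.List.pyRange_one_cons (by exact_mod_cast hk)]
    set f := (fun (limited : List Int) (i : Int) =>
        limited ++
          [(PySem.List.pyGet? limited (-1)).getD 0 +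
              if |(PySem.List.pyGet? alts i).getD 0 - (PySem.List.pyGet? limited (-1)).getD 0| > m then
                if (PySem.List.pyGet? alts i).getD 0 - (PySem.List.pyGet? limited (-1)).getD 0 > 0 then m else -m
              else (PySem.List.pyGet? alts i).getD 0 - (PySem.List.pyGet? limited (-1)).getD 0]) with hf
    rw [List.foldl_cons]
    have hacc : f acc (k : Int) = acc ++
        [prev + if |alts[k] - prev| > m then (if alts[k] - prev > 0 then m else -m) else alts[k] - prev] := by
      rw [hf]
      simp only [PySem.List.pyGet?_ofNat alts k hk, PySem.List.pyGet?_neg_one, hlast,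
        Option.getD_some]
    have hcast : (k : Int) + 1 = ((k + 1 : Nat) : Int) := by push_cast; ring
    rw [hacc, hcast, ih (k + 1)
      (prev + if |alts[k] - prev| > m then (if alts[k] - prev > 0 then m else -m) else alts[k] - prev)
      (acc ++ [prev + if |alts[k] - prev| > m then (if alts[k] - prev > 0 then m else -m) else alts[k] - prev])
      (by omega) (by simp) (by simp)]
    rw [List.drop_eq_getElem_cons hk]
    simp only [pvScan, pvStep_eq, List.append_assoc, List.singleton_append]

theorem limit_slope_spec : Claim_equal_limit_slope := by
  intro altitudes max_diff _ hpre
  obtain _ | ⟨a0, rest⟩ := altitudes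
  · exact absurd rfl hpre
  · show limit_slope (a0 :: rest) max_diff = limit_slope_alt (a0 :: rest) max_diff
    unfold limit_slope limit_slope_alt
    simp only [List.drop_succ_cons, List.drop_zero]
    rw [pvB_fold max_diff rest a0 0 [0] (by simp) (by simp)]
    have hA := pvA_fold (a0 :: rest) max_diff rest.length 1 a0 [a0]
      (by simp) (by simp) (by simp)
    simp only [Nat.cast_one, List.drop_succ_cons, List.drop_zero] at hA
    rw [hA, pvMapZip]
    rw [show ([0] ++ pvResList max_diff a0 0 rest : List Int) = 0 :: pvResList max_diff a0 0 rest from rfl]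
    simp only [List.zipWith_cons_cons, pvRes_sub]
    norm_num

@[simp] theorem limit_slope_raises : Claim_raises_limit_slope := by
  unfold Claim_raises_limit_slope
  exact ⟨fun a m _ h => by simp [Raises_limit_slope] at h; simp [Pre_limit_slope, h], by decide⟩
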